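-- pv_equiv track=rewrite | github.com/shuyirt/UWQuestSchduleExporter | calendar.py | parseWeek
-- ===== SOURCE A (Python) =====
-- def parseWeek(week):
--     a = []
--     for index, day in enumerate(week):
--
--         if(day == 'M' or day == 'm'):
--             a.append( 'MO')
--         elif(day == 'W' or day == 'w'):
--             a.append( 'WE')
--         elif(day == 'F' or day == 'f'):
--             a.append( 'FR')
--         elif((day == 'T' or day == 't') and (index+1) >= len(week)):
--             a.append( 'TU')
--         elif((day == 'T' or day == 't') and (week[index+1] != 'h')):
--             a.append( 'TU')
--         elif((day == 'T' or day == 't') and (week[index+1] == 'h')):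
--             a.append( 'TH')
--     return a
-- ===== SOURCE B (Python) =====
-- import re
--
-- _TOKEN = re.compile(r'[Tt]h|[MmWwFfTt]')
-- _CODE = {'M': 'MO', 'm': 'MO', 'W': 'WE', 'w': 'WE', 'F': 'FR', 'f': 'FR',
--          'T': 'TU', 't': 'TU', 'Th': 'TH', 'th': 'TH'}
--
-- def parseWeek(week):
--     return [_CODE[tok] for tok in _TOKEN.findall(week)]
-- ===== Notes on version B (the rewrite author's own statement) =====
-- stated objective: idiomatic
-- what changed: B is a staged regex tokenizer: re.findall with a two-alternative pattern (Th/th as one token before the single weekday letters) produces the token list in one declarative pass, then a comprehension maps each token through a literal code table, replacing A's index-carrying if/elif ladder with manual lookahead.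
import Mathlib
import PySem

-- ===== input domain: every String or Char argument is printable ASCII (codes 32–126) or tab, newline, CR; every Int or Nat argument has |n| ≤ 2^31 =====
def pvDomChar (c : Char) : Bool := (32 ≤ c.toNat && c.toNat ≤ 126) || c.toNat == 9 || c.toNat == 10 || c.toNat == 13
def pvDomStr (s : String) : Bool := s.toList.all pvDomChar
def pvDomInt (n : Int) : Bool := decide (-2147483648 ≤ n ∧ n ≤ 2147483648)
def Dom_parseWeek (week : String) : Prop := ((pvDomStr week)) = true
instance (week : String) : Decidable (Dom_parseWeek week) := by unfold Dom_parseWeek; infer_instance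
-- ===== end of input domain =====

-- B replaces A's enumerate-every-character if/elif ladder (lookahead, stray 'h' skipped a step later)
-- by a staged regex tokenizer (re.findall '[Tt]h|[MmWwFfTt]') followed by a table map (idiomatic).


-- ===== PORT A =====
-- 'for index, day in enumerate(week)' as structural recursion over the characters carrying the
-- running index; the lookahead week[index+1] is PySem.List.pyGet? on the whole character list.
def parseWeekGo (cs : List Char) : List Char → Nat → List String → List String
  | [], _, a => a
  | day :: rest, index, a =>
    parseWeekGo cs rest (index + 1)
      (if day = 'M' ∨ day = 'm' then a ++ ["MO"]
       else if day = 'W' ∨ day = 'w' then a ++ ["WE"]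
       else if day = 'F' ∨ day = 'f' then a ++ ["FR"]
       else if (day = 'T' ∨ day = 't') ∧ ((index : Int) + 1 ≥ cs.length) then a ++ ["TU"]
       else if (day = 'T' ∨ day = 't') ∧ PySem.List.pyGet? cs ((index : Int) + 1) ≠ some 'h' then a ++ ["TU"]
       else if (day = 'T' ∨ day = 't') ∧ PySem.List.pyGet? cs ((index : Int) + 1) = some 'h' then a ++ ["TH"]
       else a)

def parseWeek (week : String) : List String :=
  parseWeekGo week.toList week.toList 0 []

-- ===== PORT B =====
-- Hand port of re.findall(r'[Tt]h|[MmWwFfTt]', week): the scanner moves left to right; at each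
-- position it tries the leftmost alternative '[Tt]h' first (T/t followed by a lowercase 'h',
-- consuming both characters), then the single-letter class, and skips an unmatched character.
-- Exact for this pattern: no alternative can backtrack across positions.
def pvFindall : List Char → List String
  | [] => []
  | [c] =>
    if c = 'T' ∨ c = 't' then [String.ofList [c]]
    else if c = 'M' ∨ c = 'm' ∨ c = 'W' ∨ c = 'w' ∨ c = 'F' ∨ c = 'f' then [String.ofList [c]]
    else []
  | c :: d :: rest =>
    if c = 'T' ∨ c = 't' then
      if d = 'h' then String.ofList [c, 'h'] :: pvFindall rest
      else String.ofList [c] :: pvFindall (d :: rest)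
    else if c = 'M' ∨ c = 'm' ∨ c = 'W' ∨ c = 'w' ∨ c = 'F' ∨ c = 'f' then
      String.ofList [c] :: pvFindall (d :: rest)
    else pvFindall (d :: rest)

-- Source B's dict literal _CODE
def pvCode : PySem.Dict String String :=
  (((((((((PySem.Dict.empty.insert "M" "MO").insert "m" "MO").insert "W" "WE").insert
      "w" "WE").insert "F" "FR").insert "f" "FR").insert "T" "TU").insert "t" "TU").insert
      "Th" "TH").insert "th" "TH"

-- '_CODE[tok]' — every token produced by the pattern is a key of _CODE, so the KeyError
-- branch is unreachable; the lookup is ported as get? with a default never used.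
def parseWeek_alt (week : String) : List String :=
  (pvFindall week.toList).map (fun tok => (pvCode.get? tok).getD "")

-- ===== PRECONDITION & SPEC =====
def Spec_parseWeek (week : String) (out : List String) : Prop := out = parseWeek_alt week
instance (week : String) (out : List String) : Decidable (Spec_parseWeek week out) := by unfold Spec_parseWeek; infer_instance

-- ===== CLAIM (what is proved, stated in full; the proofs are below) =====
def Claim_equal_parseWeek : Prop := ∀ (week : String), Dom_parseWeek week → Spec_parseWeek week (parseWeek week)

-- ===== LEMMAS AND PROOFS =====

-- B's pipeline on a character list
def pvB (cs : List Char) : List String :=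
  (pvFindall cs).map (fun tok => (pvCode.get? tok).getD "")

theorem pvB_nil : pvB [] = [] := by simp [pvB, pvFindall]

theorem pvB_letter (c : Char) (code : String) (rest : List Char)
    (hT : ¬(c = 'T' ∨ c = 't'))
    (hC : c = 'M' ∨ c = 'm' ∨ c = 'W' ∨ c = 'w' ∨ c = 'F' ∨ c = 'f')
    (hcode : (pvCode.get? (String.ofList [c])).getD "" = code) :
    pvB (c :: rest) = code :: pvB rest := by
  cases rest <;> rw [pvB, pvFindall] <;> simp [hT, hC, pvB, hcode, pvFindall]

theorem pvB_T_nil (c : Char) (hc : c = 'T' ∨ c = 't') : pvB [c] = ["TU"] := by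
  rcases hc with rfl | rfl <;> rfl

theorem pvB_Th (c : Char) (ys : List Char) (hc : c = 'T' ∨ c = 't') :
    pvB (c :: 'h' :: ys) = "TH" :: pvB ys := by
  rw [pvB, pvFindall]
  rcases hc with rfl | rfl <;> simp [pvB] <;> rfl

theorem pvB_Tu (c y : Char) (ys : List Char) (hc : c = 'T' ∨ c = 't') (hy : y ≠ 'h') :
    pvB (c :: y :: ys) = "TU" :: pvB (y :: ys) := by
  rw [pvB, pvFindall]
  rcases hc with rfl | rfl <;> simp [hy, pvB] <;> rfl

theorem pvB_skip (c : Char) (rest : List Char)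
    (hT : ¬(c = 'T' ∨ c = 't'))
    (hC : ¬(c = 'M' ∨ c = 'm' ∨ c = 'W' ∨ c = 'w' ∨ c = 'F' ∨ c = 'f')) :
    pvB (c :: rest) = pvB rest := by
  cases rest <;> rw [pvB, pvFindall] <;> simp [hT, hC, pvB, pvFindall]

theorem pyGet?_mid (pre rest : List Char) (c : Char) :
    PySem.List.pyGet? (pre ++ c :: rest) ((pre.length : Int) + 1) = rest.head? := by
  have h1 : ((pre.length : Int) + 1) = ((pre.length + 1 : Nat) : Int) := by push_cast; ring
  rw [h1, PySem.List.pyGet?_natCast]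
  cases rest with
  | nil => rw [List.getElem?_eq_none] <;> simp
  | cons y ys =>
    rw [show pre ++ c :: y :: ys = (pre ++ [c]) ++ y :: ys by simp,
        List.getElem?_append_right (by simp)]
    simp

theorem go_eq (suf : List Char) : ∀ (pre : List Char) (acc : List String),
    parseWeekGo (pre ++ suf) suf pre.length acc = acc ++ pvB suf := by
  induction suf with
  | nil => intro pre acc; simp [parseWeekGo, pvB_nil]
  | cons day rest ih =>
    intro pre acc
    have step : ∀ b : List String,
        parseWeekGo (pre ++ day :: rest) rest (pre.length + 1) b = b ++ pvB rest := by
      intro b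
      have hre : pre ++ day :: rest = (pre ++ [day]) ++ rest := by simp
      have hlen : pre.length + 1 = (pre ++ [day]).length := by simp
      rw [hlen, hre]; exact ih (pre ++ [day]) b
    have hget : PySem.List.pyGet? (pre ++ day :: rest) ((pre.length : Int) + 1) = rest.head? :=
      pyGet?_mid pre rest day
    show parseWeekGo (pre ++ day :: rest) rest (pre.length + 1) _ = _
    rw [step]
    by_cases hM : day = 'M' ∨ day = 'm'
    · rw [pvB_letter day "MO" rest (by rcases hM with rfl | rfl <;> simp)
        (by rcases hM with rfl | rfl <;> simp) (by rcases hM with rfl | rfl <;> decide)]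
      simp [hM]
    · by_cases hW : day = 'W' ∨ day = 'w'
      · rw [pvB_letter day "WE" rest (by rcases hW with rfl | rfl <;> simp)
          (by rcases hW with rfl | rfl <;> simp) (by rcases hW with rfl | rfl <;> decide)]
        simp [hM, hW]
      · by_cases hF : day = 'F' ∨ day = 'f'
        · rw [pvB_letter day "FR" rest (by rcases hF with rfl | rfl <;> simp)
            (by rcases hF with rfl | rfl <;> simp) (by rcases hF with rfl | rfl <;> decide)]
          simp [hM, hW, hF]
        · by_cases hT : day = 'T' ∨ day = 't'
          · cases rest with
            | nil =>
              rw [pvB_T_nil day hT]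
              simp [pvB_nil, hM, hW, hF, hT]
            | cons y ys =>
              by_cases hy : y = 'h'
              · subst hy
                rw [pvB_Th day ys hT,
                    pvB_skip 'h' ys (by simp) (by simp)]
                simp [hM, hW, hF, hT, hget]
                rw [if_neg (by omega : ¬((ys.length : Int) < 0))]
                simp
              · rw [pvB_Tu day y ys hT hy]
                have hne : PySem.List.pyGet? (pre ++ day :: y :: ys) ((pre.length : Int) + 1) ≠ some 'h' := by
                  rw [hget]; simp [hy]
                simp [hM, hW, hF, hT, hne]
          · rw [pvB_skip day rest hT (by push Not at hM hW hF; simp [hM.1, hM.2, hW.1, hW.2, hF.1, hF.2])]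
            simp [hM, hW, hF, hT]

-- ===== VERDICT (by name: the statement is the Claim_ definition above) =====
theorem parseWeek_spec : Claim_equal_parseWeek := by
  intro week _
  show parseWeek week = parseWeek_alt week
  simpa [parseWeek, parseWeek_alt, pvB] using go_eq week.toList [] []
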